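-- pv_equiv track=rewrite | github.com/DAEUN9/TIL | Soving/programmers/level0/A 강조하기.py | solution
-- ===== SOURCE A (Python) =====
-- def solution(myString):
--     answer = ''
--     for s in myString:
--         if s == "a":
--             answer += "A"
--         elif s == "A":
--             answer += "A"
--         else:
--             answer += s.lower()
--     return answer
-- ===== SOURCE B (Python) =====
-- def solution(myString):
--     return myString.lower().replace('a', 'A')
-- ===== Notes on version B (the rewrite author's own statement) =====
-- stated objective: idiomatic
-- what changed: Replaces the explicit per-character loop with accumulator string concatenation by two whole-string operations: lowercase the whole string, then replace every lowercase-a by uppercase-A.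
import Mathlib
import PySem

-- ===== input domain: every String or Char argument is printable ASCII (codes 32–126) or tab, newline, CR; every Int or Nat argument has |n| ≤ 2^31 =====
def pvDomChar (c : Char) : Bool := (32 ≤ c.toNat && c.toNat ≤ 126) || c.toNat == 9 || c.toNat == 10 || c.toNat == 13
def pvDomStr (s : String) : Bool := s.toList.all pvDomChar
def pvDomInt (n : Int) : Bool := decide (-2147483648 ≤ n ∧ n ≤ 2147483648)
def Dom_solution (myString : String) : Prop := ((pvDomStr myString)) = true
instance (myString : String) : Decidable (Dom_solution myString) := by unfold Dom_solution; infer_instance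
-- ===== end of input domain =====

-- B replaces A's per-character branching loop by two whole-string operations (lower then replace); objective: idiomatic.

-- ===== PORT A =====
def solution (myString : String) : String :=
  myString.toList.foldl (fun answer s =>
    if s == 'a' then answer ++ "A"
    else if s == 'A' then answer ++ "A"
    else answer ++ PySem.Str.lower (String.ofList [s])) ""

-- ===== PORT B =====
def solution_alt (myString : String) : String :=
  PySem.Str.replace (PySem.Str.lower myString) "a" "A"

-- ===== PRECONDITION & SPEC =====
def Spec_solution (myString : String) (out : String) : Prop := out = solution_alt myString
instance (myString : String) (out : String) : Decidable (Spec_solution myString out) := by unfold Spec_solution; infer_instance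

-- ===== CLAIM (what is proved, stated in full; the proofs are below) =====
def Claim_equal_solution : Prop := ∀ (myString : String), Dom_solution myString → Spec_solution myString (solution myString)

-- ===== LEMMAS AND PROOFS =====

-- the per-character function A applies
def pvStepA (c : Char) : Char :=
  if c == 'a' then 'A' else if c == 'A' then 'A' else PySem.Chars.lowerChar c

lemma pvToNat_ofNat (n : Nat) (h : n < 1000) : (Char.ofNat n).toNat = n := by
  unfold Char.ofNat
  split
  · rfl
  · next h2 => exact absurd (by constructor; omega : Nat.isValidChar n) h2

lemma pvLowerChar_eq_a_iff (c : Char) :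
    PySem.Chars.lowerChar c = 'a' ↔ (c = 'a' ∨ c = 'A') := by
  unfold PySem.Chars.lowerChar PySem.Chars.isupper
  constructor
  · intro he
    split_ifs at he with h
    · simp only [Bool.and_eq_true, decide_eq_true_eq] at h
      have hv1 : 65 ≤ c.toNat := Char.le_def.mp h.1
      have hv2 : c.toNat ≤ 90 := Char.le_def.mp h.2
      have ht : (Char.ofNat (c.toNat + 32)).toNat = c.toNat + 32 :=
        pvToNat_ofNat _ (by omega)
      have h65 : c.toNat = 65 := by
        have := congrArg Char.toNat he
        rw [ht] at this
        simpa using this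
      right
      have := Char.ofNat_toNat c
      rw [h65] at this
      exact this.symm
    · exact Or.inl he
  · rintro (rfl | rfl) <;> decide

lemma pvStepA_eq (c : Char) :
    pvStepA c = if PySem.Chars.lowerChar c = 'a' then 'A' else PySem.Chars.lowerChar c := by
  unfold pvStepA
  by_cases h1 : c = 'a'
  · subst h1; decide
  by_cases h2 : c = 'A'
  · subst h2; decide
  have : ¬ PySem.Chars.lowerChar c = 'a' := by
    rw [pvLowerChar_eq_a_iff]; tauto
  simp [h1, h2, this]

-- A's loop computes the per-character map
lemma pvFoldA (l : List Char) (acc : String) :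
    l.foldl (fun answer s =>
      if s == 'a' then answer ++ "A"
      else if s == 'A' then answer ++ "A"
      else answer ++ PySem.Str.lower (String.ofList [s])) acc
    = acc ++ String.ofList (l.map pvStepA) := by
  induction l generalizing acc with
  | nil => simp
  | cons c t ih =>
    simp only [List.foldl_cons, List.map_cons, ih]
    have hstep : ∀ a : String,
        (if c == 'a' then a ++ "A"
         else if c == 'A' then a ++ "A"
         else a ++ PySem.Str.lower (String.ofList [c])) = a ++ String.ofList [pvStepA c] := by
      intro a
      unfold pvStepA
      by_cases h1 : c = 'a'
      · subst h1; rfl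
      by_cases h2 : c = 'A'
      · subst h2; rfl
      · simp only [h1, h2, beq_iff_eq, if_false]
        congr 1
        apply String.ext
        simp [PySem.Str.toList_lower, PySem.Chars.lower]
    rw [hstep]
    apply String.ext
    simp

-- characterisation of replace with the single-char pattern 'a'
lemma pvReplaceGo (l : List Char) (fuel : Nat) (acc : List Char) (hf : l.length ≤ fuel) :
    PySem.Chars.replace.go ['a'] ['A'] fuel l acc
    = acc.reverse ++ l.map (fun c => if c = 'a' then 'A' else c) := by
  induction l generalizing fuel acc with
  | nil =>
    cases fuel <;> simp [PySem.Chars.replace.go]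
  | cons c t ih =>
    cases fuel with
    | zero => simp at hf
    | succ n =>
      simp only [PySem.Chars.replace.go]
      by_cases h : c = 'a'
      · subst h
        have hp : List.isPrefixOf ['a'] ('a' :: t) = true := by
          simp [List.isPrefixOf]
        rw [if_pos hp]
        rw [show List.drop ['a'].length ('a' :: t) = t from rfl]
        simp only [List.length_cons] at hf
        rw [ih _ _ (by omega)]
        simp
      · have hp : List.isPrefixOf ['a'] (c :: t) = false := by
          simp [List.isPrefixOf]
          exact fun hh => h hh.symm
        rw [if_neg (by simp [hp])]
        simp only [List.length_cons] at hf
        rw [ih _ _ (by omega)]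
        simp [h]

lemma pvReplace (l : List Char) :
    PySem.Chars.replace l ['a'] ['A'] = l.map (fun c => if c = 'a' then 'A' else c) := by
  unfold PySem.Chars.replace
  rw [if_neg (by simp)]
  simpa using pvReplaceGo l l.length [] le_rfl

-- ===== VERDICT (by name: the statement is the Claim_ definition above) =====
theorem solution_spec : Claim_equal_solution := by
  intro s _
  unfold Spec_solution solution solution_alt
  rw [pvFoldA]
  apply String.ext
  have h1 : (PySem.Str.replace (PySem.Str.lower s) "a" "A").toList
      = PySem.Chars.replace (PySem.Chars.lower s.toList) ['a'] ['A'] := by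
    simp [PySem.Str.toList_replace, PySem.Str.toList_lower]
  rw [h1, pvReplace]
  simp only [PySem.Chars.lower, List.map_map]
  have h2 : ("" ++ String.ofList (s.toList.map pvStepA)).toList
      = s.toList.map pvStepA := by simp
  rw [h2]
  apply List.map_congr_left
  intro c _
  simp only [Function.comp]
  exact pvStepA_eq c
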